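-- pv_equiv track=rewrite | github.com/MrBrantCode/unitest_baseline | mut_generate/mist_train_cf/cf_31939/solution.py | findMissingBrace
-- ===== SOURCE A (Python) =====
-- def findMissingBrace(code_snippet):
--     stack = []
--     for i, char in enumerate(code_snippet):
--         if char == '{':
--             stack.append(i)
--         elif char == '}':
--             if stack:
--                 stack.pop()
--             else:
--                 return i
--     return stack[0] if stack else 0
-- ===== SOURCE B (Python) =====
-- def findMissingBrace(code_snippet):
--     # pass 1: running brace balance at every position
--     prefix = []
--     bal = 0
--     for c in code_snippet:
--         bal += (c == '{') - (c == '}')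
--         prefix.append(bal)
--     # pass 2: first position where the balance dips below zero = unmatched '}'
--     for i, v in enumerate(prefix):
--         if v < 0:
--             return i
--     if bal == 0:
--         return 0
--     # pass 3: last position where the balance is zero
--     last_zero = -1
--     for i, v in enumerate(prefix):
--         if v == 0:
--             last_zero = i
--     # pass 4: the first '{' after it is the earliest never-matched '{'
--     for i, c in enumerate(code_snippet):
--         if i > last_zero and c == '{':
--             return i
-- ===== Notes on version B (the rewrite author's own statement) =====
-- stated objective: alternative
-- what changed: Replaces the online stack simulation with a staged offline algorithm: first materialise the array of running brace balances, then answer by positional queries on it (first index where the balance goes negative; else, if the total balance is positive, the first '{' after the last zero of the balance array).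
import Mathlib
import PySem

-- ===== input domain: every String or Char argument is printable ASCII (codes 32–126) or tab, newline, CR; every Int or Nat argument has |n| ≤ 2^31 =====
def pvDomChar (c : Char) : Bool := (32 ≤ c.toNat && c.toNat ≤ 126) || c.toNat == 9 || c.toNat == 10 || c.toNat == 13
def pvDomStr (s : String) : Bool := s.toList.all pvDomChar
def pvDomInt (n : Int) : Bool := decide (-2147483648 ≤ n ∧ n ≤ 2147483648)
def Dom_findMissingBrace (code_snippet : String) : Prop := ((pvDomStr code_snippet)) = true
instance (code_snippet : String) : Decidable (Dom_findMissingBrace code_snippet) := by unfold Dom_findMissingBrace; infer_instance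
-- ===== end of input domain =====

-- B replaces A's online stack simulation by a staged offline algorithm: it builds the
-- array of running brace balances and answers by positional queries on that array.

-- ===== PORT A =====
-- literal port of A: stack of indices, append at end, pop() from end, final stack[0]
def findMissingBraceLoopA : List Char → Int → List Int → Int
  | [], _, stack => match stack with
    | [] => 0
    | s :: _ => s
  | c :: rest, i, stack =>
    if c = '{' then findMissingBraceLoopA rest (i + 1) (stack ++ [i])
    else if c = '}' then
      match stack with
      | [] => i
      | _ => findMissingBraceLoopA rest (i + 1) stack.dropLast
    else findMissingBraceLoopA rest (i + 1) stack

def findMissingBrace (code_snippet : String) : Int :=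
  findMissingBraceLoopA code_snippet.toList 0 []

-- ===== PORT B =====
-- pass 1 of Source B: the loop building the prefix-balance list and the final balance
def altBuild : List Char → Int → List Int × Int
  | [], bal => ([], bal)
  | c :: rest, bal =>
    let bal' := bal + ((if c = '{' then (1 : Int) else 0) - (if c = '}' then 1 else 0))
    let p := altBuild rest bal'
    (bal' :: p.1, p.2)

-- pass 2 of Source B: first index whose balance is negative (early return)
def altFirstNeg : List Int → Int → Option Int
  | [], _ => none
  | v :: rest, i => if v < 0 then some i else altFirstNeg rest (i + 1)

-- pass 3 of Source B: last index whose balance is zero (accumulator starts at -1)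
def altLastZero : List Int → Int → Int → Int
  | [], _, acc => acc
  | v :: rest, i, acc => altLastZero rest (i + 1) (if v = 0 then i else acc)

-- pass 4 of Source B: first '{' strictly after last_zero (Python always finds one here;
-- the [] case is unreachable, 0 is a dummy)
def altFirstOpenAfter : List Char → Int → Int → Int
  | [], _, _ => 0
  | c :: rest, i, lz => if i > lz ∧ c = '{' then i else altFirstOpenAfter rest (i + 1) lz

def findMissingBrace_alt (code_snippet : String) : Int :=
  let l := code_snippet.toList
  let pb := altBuild l 0
  match altFirstNeg pb.1 0 with
  | some i => i
  | none =>
    if pb.2 = 0 then 0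
    else altFirstOpenAfter l 0 (altLastZero pb.1 0 (-1))

-- ===== PRECONDITION & SPEC =====
def Spec_findMissingBrace (code_snippet : String) (out : Int) : Prop := out = findMissingBrace_alt code_snippet
instance (code_snippet : String) (out : Int) : Decidable (Spec_findMissingBrace code_snippet out) := by unfold Spec_findMissingBrace; infer_instance

-- ===== CLAIM (what is proved, stated in full; the proofs are below) =====
def Claim_equal_findMissingBrace : Prop := ∀ (code_snippet : String), Dom_findMissingBrace code_snippet → Spec_findMissingBrace code_snippet (findMissingBrace code_snippet)

-- ===== LEMMAS AND PROOFS =====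

-- intermediate one-pass counter loop (proof device bridging A's stack and B's stages)
def loopC : List Char → Int → Int → Int → Int
  | [], _, depth, firstOpen => if depth > 0 then firstOpen else 0
  | c :: rest, i, depth, firstOpen =>
    if c = '{' then
      loopC rest (i + 1) (depth + 1) (if depth = 0 then i else firstOpen)
    else if c = '}' then
      if depth = 0 then i else loopC rest (i + 1) (depth - 1) firstOpen
    else loopC rest (i + 1) depth firstOpen

-- A's stack loop equals the counter loop when depth = |stack| and firstOpen tracks stack.head?
lemma loopAC_eq (rest : List Char) (i : Int) (stack : List Int) (f : Int)
    (hf : ∀ s, stack.head? = some s → f = s) :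
    findMissingBraceLoopA rest i stack = loopC rest i (stack.length : Int) f := by
  induction rest generalizing i stack f with
  | nil =>
    cases stack with
    | nil => simp [findMissingBraceLoopA, loopC]
    | cons s t =>
      have := hf s rfl
      simp [findMissingBraceLoopA, loopC, this]
  | cons c rest ih =>
    by_cases hc : c = '{'
    · have h1 : findMissingBraceLoopA (c :: rest) i stack
          = findMissingBraceLoopA rest (i + 1) (stack ++ [i]) := by
        simp [findMissingBraceLoopA, hc]
      have h2 : loopC (c :: rest) i (stack.length : Int) f
          = loopC rest (i + 1) ((stack.length : Int) + 1)
              (if (stack.length : Int) = 0 then i else f) := by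
        simp [loopC, hc]
      rw [h1, h2]
      have hlen : ((stack ++ [i]).length : Int) = (stack.length : Int) + 1 := by simp
      rw [← hlen]
      apply ih
      intro s hs
      cases stack with
      | nil => simp at hs; simp [hs]
      | cons a t =>
        simp at hs
        have hne : ¬(((a :: t).length : Int) = 0) := by
          have h : (a :: t).length = t.length + 1 := rfl
          rw [h]; push_cast; omega
        rw [if_neg hne, ← hs]
        exact hf a rfl
    · by_cases hc2 : c = '}'
      · cases stack with
        | nil => simp [findMissingBraceLoopA, loopC, hc2]
        | cons a t =>
          have hne : ¬(((a :: t).length : Int) = 0) := by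
            have h : (a :: t).length = t.length + 1 := rfl
            rw [h]; push_cast; omega
          have h1 : findMissingBraceLoopA (c :: rest) i (a :: t)
              = findMissingBraceLoopA rest (i + 1) (a :: t).dropLast := by
            simp [findMissingBraceLoopA, hc2]
          have h2 : loopC (c :: rest) i ((a :: t).length : Int) f
              = loopC rest (i + 1) (((a :: t).length : Int) - 1) f := by
            simp only [loopC]
            rw [if_neg hc, if_pos hc2, if_neg hne]
          rw [h1, h2]
          have hlen : (((a :: t).dropLast).length : Int) = ((a :: t).length : Int) - 1 := by
            simp [List.length_dropLast]
          rw [← hlen]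
          apply ih
          intro s hs
          apply hf
          cases t with
          | nil => simp at hs
          | cons b u =>
            have h : (a :: b :: u).dropLast = a :: (b :: u).dropLast := by simp
            rw [h] at hs
            simp at hs ⊢
            exact hs
      · have h1 : findMissingBraceLoopA (c :: rest) i stack
            = findMissingBraceLoopA rest (i + 1) stack := by
          simp [findMissingBraceLoopA, hc, hc2]
        have h2 : loopC (c :: rest) i (stack.length : Int) f
            = loopC rest (i + 1) (stack.length : Int) f := by
          simp [loopC, hc, hc2]
        rw [h1, h2]
        exact ih _ _ _ hf

-- altBuild unpacked: prefix list and final balance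
lemma altBuild_fst_cons (c : Char) (rest : List Char) (bal : Int) :
    (altBuild (c :: rest) bal).1
      = (bal + ((if c = '{' then (1 : Int) else 0) - (if c = '}' then 1 else 0)))
        :: (altBuild rest (bal + ((if c = '{' then (1 : Int) else 0) - (if c = '}' then 1 else 0)))).1 := by
  simp [altBuild]

lemma altBuild_snd_cons (c : Char) (rest : List Char) (bal : Int) :
    (altBuild (c :: rest) bal).2
      = (altBuild rest (bal + ((if c = '{' then (1 : Int) else 0) - (if c = '}' then 1 else 0)))).2 := by
  simp [altBuild]

-- every entry of the prefix list built from bal ≥ 0 never mentions indices; we need: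
-- lastZero ignores its accumulator as soon as a zero occurs
lemma lastZero_acc_irrel (xs : List Int) (j a a' : Int) (h : (0 : Int) ∈ xs) :
    altLastZero xs j a = altLastZero xs j a' := by
  induction xs generalizing j a a' with
  | nil => simp at h
  | cons v rest ih =>
    by_cases hv : v = 0
    · simp [altLastZero, hv]
    · have hm : (0 : Int) ∈ rest := by
        rcases List.mem_cons.mp h with h0 | h0
        · exact absurd h0.symm hv
        · exact h0
      simp only [altLastZero, if_neg hv]
      exact ih (j + 1) a a' hm

lemma lastZero_no_zero (xs : List Int) (j a : Int) (h : (0 : Int) ∉ xs) :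
    altLastZero xs j a = a := by
  induction xs generalizing j a with
  | nil => simp [altLastZero]
  | cons v rest ih =>
    have hv : ¬(v = 0) := fun hv => h (by simp [← hv])
    have hr : (0 : Int) ∉ rest := fun hm => h (List.mem_cons_of_mem _ hm)
    simp only [altLastZero, if_neg hv]
    exact ih (j + 1) a hr

lemma lastZero_mem_ge (xs : List Int) (j a : Int) (h : (0 : Int) ∈ xs) :
    j ≤ altLastZero xs j a := by
  induction xs generalizing j a with
  | nil => simp at h
  | cons v rest ih =>
    by_cases hv : v = 0
    · simp only [altLastZero, if_pos hv]
      by_cases hr : (0 : Int) ∈ rest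
      · have := ih (j + 1) j hr; omega
      · rw [lastZero_no_zero rest (j + 1) j hr]
    · have hm : (0 : Int) ∈ rest := by
        rcases List.mem_cons.mp h with h0 | h0
        · exact absurd h0.symm hv
        · exact h0
      simp only [altLastZero, if_neg hv]
      have := ih (j + 1) (if v = 0 then j else a) hm
      have h2 := ih (j + 1) a hm
      omega

-- MAIN: the counter loop equals the staged pipeline, generalized over start index,
-- depth and firstOpen.
lemma loopC_staged (l : List Char) (i d f : Int) (hd : 0 ≤ d) :
    loopC l i d f =
      (match altFirstNeg (altBuild l d).1 i with
       | some j => j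
       | none =>
         if (altBuild l d).2 = 0 then 0
         else if (0 : Int) ∈ (altBuild l d).1 ∨ d = 0 then
           altFirstOpenAfter l i (altLastZero (altBuild l d).1 i (i - 1))
         else f) := by
  induction l generalizing i d f with
  | nil =>
    simp only [altBuild, altFirstNeg, altLastZero, altFirstOpenAfter, loopC]
    by_cases h0 : d = 0
    · simp [h0]
    · have : d > 0 := lt_of_le_of_ne hd (Ne.symm h0)
      simp [h0, this]
  | cons c rest ih =>
    set δ : Int := ((if c = '{' then (1 : Int) else 0) - (if c = '}' then 1 else 0)) with hδ
    by_cases hc : c = '{'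
    · -- '{' : balance d+1 ≥ 1, firstNeg skips, head nonzero
      have hδ1 : δ = 1 := by simp [hδ, hc]
      have hd1 : (0 : Int) ≤ d + 1 := by omega
      have hL : loopC (c :: rest) i d f
          = loopC rest (i + 1) (d + 1) (if d = 0 then i else f) := by simp [loopC, hc]
      rw [hL, ih (i + 1) (d + 1) (if d = 0 then i else f) hd1]
      rw [altBuild_fst_cons, altBuild_snd_cons, ← hδ, hδ1]
      have hhead : ¬(d + 1 < 0) := by omega
      have hheadne : ¬(d + 1 = 0) := by omega
      simp only [altFirstNeg, if_neg hhead]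
      cases hfn : altFirstNeg (altBuild rest (d + 1)).1 (i + 1) with
      | some j => simp
      | none =>
        simp only []
        by_cases hb : (altBuild rest (d + 1)).2 = 0
        · simp [hb]
        · simp only [if_neg hb]
          have hmemc : ((0 : Int) ∈ (d + 1) :: (altBuild rest (d + 1)).1 ∨ d = 0)
              ↔ ((0 : Int) ∈ (altBuild rest (d + 1)).1 ∨ d = 0) := by
            constructor
            · rintro (h | h)
              · rcases List.mem_cons.mp h with h0 | h0
                · omega
                · exact Or.inl h0
              · exact Or.inr h
            · rintro (h | h)
              · exact Or.inl (List.mem_cons_of_mem _ h)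
              · exact Or.inr h
          by_cases hm : (0 : Int) ∈ (altBuild rest (d + 1)).1
          · -- a zero occurs later: accumulators irrelevant, result index ≥ i+1 > i
            have hcond1 : ((0 : Int) ∈ (d + 1) :: (altBuild rest (d + 1)).1 ∨ d = 0) := by
              rw [hmemc]; exact Or.inl hm
            have hcond2 : ((0 : Int) ∈ (altBuild rest (d + 1)).1 ∨ d + 1 = 0) := Or.inl hm
            rw [if_pos hcond2, if_pos hcond1]
            have hlz : altLastZero ((d + 1) :: (altBuild rest (d + 1)).1) i (i - 1)
                = altLastZero (altBuild rest (d + 1)).1 (i + 1) (i + 1 - 1) := by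
              simp only [altLastZero, if_neg hheadne]
              exact lastZero_acc_irrel _ _ _ _ hm
            rw [hlz]
            set m := altLastZero (altBuild rest (d + 1)).1 (i + 1) (i + 1 - 1) with hm'
            have hge : i + 1 ≤ m := lastZero_mem_ge _ _ _ hm
            have : altFirstOpenAfter (c :: rest) i m = altFirstOpenAfter rest (i + 1) m := by
              simp only [altFirstOpenAfter]
              rw [if_neg]; push_neg; intro h; omega
            rw [this]
          · -- no zero later
            have hcond2 : ¬((0 : Int) ∈ (altBuild rest (d + 1)).1 ∨ d + 1 = 0) := by
              push_neg; exact ⟨hm, hheadne⟩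
            rw [if_neg hcond2]
            by_cases h0 : d = 0
            · -- firstOpen was just set to i; staged side: no zeros at all, lastZero = i-1,
              -- head is '{' at index i > i-1 → i
              have hcond1 : ((0 : Int) ∈ (d + 1) :: (altBuild rest (d + 1)).1 ∨ d = 0) :=
                Or.inr h0
              rw [if_pos hcond1]
              have hnm : (0 : Int) ∉ (d + 1) :: (altBuild rest (d + 1)).1 := by
                intro h
                rcases List.mem_cons.mp h with ha | ha
                · omega
                · exact hm ha
              rw [lastZero_no_zero _ _ _ hnm]
              simp [altFirstOpenAfter, hc, h0, show i > i - 1 by omega]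
            · have hcond1 : ¬((0 : Int) ∈ (d + 1) :: (altBuild rest (d + 1)).1 ∨ d = 0) := by
                rw [hmemc]; push_neg; exact ⟨hm, h0⟩
              rw [if_neg hcond1]
              simp [h0]
    · by_cases hc2 : c = '}'
      · have hδ1 : δ = -1 := by simp [hδ, hc, hc2]
        by_cases h0 : d = 0
        · -- unmatched '}': balance -1 → firstNeg fires with i; loopC returns i
          have hL : loopC (c :: rest) i d f = i := by simp [loopC, hc, hc2, h0]
          rw [hL, altBuild_fst_cons, ← hδ, hδ1, h0]
          norm_num [altFirstNeg]
        · have hdpos : 0 < d := lt_of_le_of_ne hd (Ne.symm h0)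
          have hd1 : (0 : Int) ≤ d - 1 := by omega
          have hL : loopC (c :: rest) i d f = loopC rest (i + 1) (d - 1) f := by
            simp [loopC, hc, hc2, h0]
          rw [hL, ih (i + 1) (d - 1) f hd1]
          rw [altBuild_fst_cons, altBuild_snd_cons, ← hδ, hδ1]
          have hhead : ¬(d + -1 < 0) := by omega
          simp only [altFirstNeg, if_neg hhead]
          have hrepl : d + -1 = d - 1 := by ring
          rw [hrepl]
          cases hfn : altFirstNeg (altBuild rest (d - 1)).1 (i + 1) with
          | some j => simp
          | none =>
            simp only []
            by_cases hb : (altBuild rest (d - 1)).2 = 0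
            · simp [hb]
            · simp only [if_neg hb]
              have hcondiff : ((0 : Int) ∈ (d - 1) :: (altBuild rest (d - 1)).1 ∨ d = 0)
                  ↔ ((0 : Int) ∈ (altBuild rest (d - 1)).1 ∨ d - 1 = 0) := by
                constructor
                · rintro (h | h)
                  · rcases List.mem_cons.mp h with h0' | h0'
                    · exact Or.inr (by omega)
                    · exact Or.inl h0'
                  · omega
                · rintro (h | h)
                  · exact Or.inl (List.mem_cons_of_mem _ h)
                  · exact Or.inl (List.mem_cons.mpr (Or.inl (by omega)))
              by_cases hcond2 : ((0 : Int) ∈ (altBuild rest (d - 1)).1 ∨ d - 1 = 0)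
              · rw [if_pos hcond2, if_pos (hcondiff.mpr hcond2)]
                have hfoa : ∀ m, altFirstOpenAfter (c :: rest) i m
                    = altFirstOpenAfter rest (i + 1) m := by
                  intro m; simp [altFirstOpenAfter, hc]
                rw [hfoa]
                congr 1
                -- lastZero: head contributes acc i exactly when d-1 = 0
                by_cases hdz : d - 1 = 0
                · have : (d - 1 : Int) = 0 := hdz
                  simp only [altLastZero, if_pos this]
                  congr 1; omega
                · simp only [altLastZero, if_neg hdz]
                  rcases hcond2 with hmem | h
                  · exact lastZero_acc_irrel _ _ _ _ hmem
                  · exact absurd h hdz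
              · rw [if_neg hcond2, if_neg (fun h => hcond2 (hcondiff.mp h))]
      · -- other char: balance unchanged
        have hδ0 : δ = 0 := by simp [hδ, hc, hc2]
        have hL : loopC (c :: rest) i d f = loopC rest (i + 1) d f := by
          simp [loopC, hc, hc2]
        rw [hL, ih (i + 1) d f hd]
        rw [altBuild_fst_cons, altBuild_snd_cons, ← hδ, hδ0]
        have hhead : ¬(d + 0 < 0) := by omega
        simp only [altFirstNeg, if_neg hhead]
        have hrepl : d + 0 = d := by ring
        rw [hrepl]
        cases hfn : altFirstNeg (altBuild rest d).1 (i + 1) with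
        | some j => simp
        | none =>
          simp only []
          by_cases hb : (altBuild rest d).2 = 0
          · simp [hb]
          · simp only [if_neg hb]
            have hcondiff : ((0 : Int) ∈ d :: (altBuild rest d).1 ∨ d = 0)
                ↔ ((0 : Int) ∈ (altBuild rest d).1 ∨ d = 0) := by
              constructor
              · rintro (h | h)
                · rcases List.mem_cons.mp h with h0' | h0'
                  · exact Or.inr h0'.symm
                  · exact Or.inl h0'
                · exact Or.inr h
              · rintro (h | h)
                · exact Or.inl (List.mem_cons_of_mem _ h)
                · exact Or.inl (List.mem_cons.mpr (Or.inl h.symm))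
            by_cases hcond2 : ((0 : Int) ∈ (altBuild rest d).1 ∨ d = 0)
            · rw [if_pos hcond2, if_pos (hcondiff.mpr hcond2)]
              have hfoa : ∀ m, altFirstOpenAfter (c :: rest) i m
                  = altFirstOpenAfter rest (i + 1) m := by
                intro m; simp [altFirstOpenAfter, hc]
              rw [hfoa]
              congr 1
              by_cases hdz : d = 0
              · simp only [altLastZero, if_pos hdz]
                congr 1; omega
              · simp only [altLastZero, if_neg hdz]
                rcases hcond2 with hmem | h
                · exact lastZero_acc_irrel _ _ _ _ hmem
                · exact absurd h hdz
            · rw [if_neg hcond2, if_neg (fun h => hcond2 (hcondiff.mp h))]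

-- ===== VERDICT (by name: the statement is the Claim_ definition above) =====
theorem findMissingBrace_spec : Claim_equal_findMissingBrace := by
  intro s _
  unfold Spec_findMissingBrace findMissingBrace findMissingBrace_alt
  have hA := loopAC_eq s.toList 0 [] 0 (by intro x hx; simp at hx)
  have hC := loopC_staged s.toList 0 0 0 (le_refl 0)
  simp only [List.length_nil, Int.natCast_zero] at hA
  rw [hA, hC]
  simp only []
  cases hfn : altFirstNeg (altBuild s.toList 0).1 0 with
  | some j => simp
  | none =>
    simp only []
    by_cases hb : (altBuild s.toList 0).2 = 0
    · simp [hb]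
    · rw [if_neg hb, if_neg hb]
      norm_num
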